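-- pv_equiv track=rewrite | github.com/faizananis/DSA-leetcode-journey | 1784-check-if-binary-string-has-at-most-one-segment-of-ones/1784-check-if-binary-string-has-at-most-one-segment-of-ones.py | checkOnesSegment
-- ===== SOURCE A (Python) =====
-- def checkOnesSegment(s: str) -> bool:
--     flag=False
--     for i in range(len(s)):
--         if s[i]=='0':
--             flag=True
--         elif flag==True:
--             return False
--     return True
-- ===== SOURCE B (Python) =====
-- def checkOnesSegment(s: str) -> bool:
--     return '0' not in s.rstrip('0')
-- ===== Notes on version B (the rewrite author's own statement) =====
-- stated objective: idiomatic
-- what changed: Replaces the index loop with a boolean flag by stripping trailing zero characters and one substring-membership test: the answer is True iff no zero character remains before the trailing zeros.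
import Mathlib
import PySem

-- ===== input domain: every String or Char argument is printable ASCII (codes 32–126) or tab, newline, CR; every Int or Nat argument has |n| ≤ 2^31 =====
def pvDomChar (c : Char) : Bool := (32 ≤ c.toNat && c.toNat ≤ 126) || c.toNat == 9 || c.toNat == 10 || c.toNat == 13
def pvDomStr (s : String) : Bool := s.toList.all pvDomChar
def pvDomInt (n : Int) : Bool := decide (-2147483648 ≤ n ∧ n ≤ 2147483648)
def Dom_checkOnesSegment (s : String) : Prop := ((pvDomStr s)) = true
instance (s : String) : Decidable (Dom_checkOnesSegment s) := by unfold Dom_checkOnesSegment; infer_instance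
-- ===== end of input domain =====

-- B: instead of scanning with a flag, strip trailing '0's and test whether a '0' remains (idiomatic; return value only).
-- ===== PORT A =====
-- loop over the characters with the boolean flag, branches in source order
def checkOnesSegmentGo : List Char → Bool → Bool
  | [], _ => true
  | c :: rest, flag =>
    if c == '0' then checkOnesSegmentGo rest true
    else if flag then false
    else checkOnesSegmentGo rest flag

def checkOnesSegment (s : String) : Bool := checkOnesSegmentGo s.toList false

-- ===== PORT B =====
-- s.rstrip('0') ported by hand (no PySem rstrip-with-chars primitive): drop the trailing '0' characters; exact
def rstripZeros (l : List Char) : List Char := (l.reverse.dropWhile (· == '0')).reverse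

-- '0' not in t  =  ¬ PySem.Chars.isIn ['0'] t
def checkOnesSegment_alt (s : String) : Bool := !(PySem.Chars.isIn ['0'] (rstripZeros s.toList))

-- ===== PRECONDITION & SPEC =====
def Spec_checkOnesSegment (s : String) (out : Bool) : Prop := out = checkOnesSegment_alt s
instance (s : String) (out : Bool) : Decidable (Spec_checkOnesSegment s out) := by unfold Spec_checkOnesSegment; infer_instance

-- ===== CLAIM (what is proved, stated in full; the proofs are below) =====
def Claim_equal_checkOnesSegment : Prop := ∀ (s : String), Dom_checkOnesSegment s → Spec_checkOnesSegment s (checkOnesSegment s)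

-- ===== LEMMAS AND PROOFS =====

theorem singleton_infix_iff_mem (a : Char) (l : List Char) : [a] <:+: l ↔ a ∈ l := by
  constructor
  · intro h; exact h.subset (by simp)
  · intro h
    obtain ⟨u, v, rfl⟩ := List.append_of_mem h
    exact ⟨u, v, by simp⟩

theorem isIn_singleton (a : Char) (l : List Char) :
    PySem.Chars.isIn [a] l = l.contains a := by
  by_cases h : a ∈ l
  · simp [ (PySem.Chars.isIn_iff_infix [a] l).2 ((singleton_infix_iff_mem a l).2 h), h]
  · have := PySem.Chars.isIn_eq_false_iff ([a]) l
    simp only [singleton_infix_iff_mem] at this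
    simp [this.2 h, h]

theorem goA_true (l : List Char) : checkOnesSegmentGo l true = l.all (· == '0') := by
  induction l with
  | nil => rfl
  | cons c rest ih =>
    by_cases h : c = '0' <;> simp [checkOnesSegmentGo, h, ih]

theorem goA_eq (l : List Char) :
    checkOnesSegmentGo l false = !((l.reverse.dropWhile (· == '0')).contains '0') := by
  induction l with
  | nil => rfl
  | cons c rest ih =>
    by_cases hall : rest.reverse.dropWhile (· == '0') = []
    · have hz : ∀ x ∈ rest, x = '0' := by
        have := List.dropWhile_eq_nil_iff.1 hall
        intro x hx
        simpa using this x (List.mem_reverse.2 hx)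
      by_cases h : c = '0'
      · simp [checkOnesSegmentGo, h, goA_true, List.dropWhile_append, hall,
              List.all_eq_true]
        exact hz
      · simp [checkOnesSegmentGo, h, ih, List.dropWhile_append, hall]
        exact fun he => h he.symm
    · have hne : ¬ (rest.reverse.dropWhile (· == '0')).isEmpty = true := by
        simpa [List.isEmpty_iff] using hall
      by_cases h : c = '0'
      · have hnall : ¬ rest.all (· == '0') = true := by
          intro hcon
          apply hall
          apply List.dropWhile_eq_nil_iff.2
          intro x hx
          simpa using (List.all_eq_true.1 hcon) x (List.mem_reverse.1 hx)
        simp [checkOnesSegmentGo, h, goA_true, List.dropWhile_append, hne, hnall]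
      · simp [checkOnesSegmentGo, h, ih, List.dropWhile_append, hne]
        exact fun _ he => h he.symm

-- ===== VERDICT (by name: the statement is the Claim_ definition above) =====
theorem checkOnesSegment_spec : Claim_equal_checkOnesSegment := by
  intro s _
  unfold Spec_checkOnesSegment checkOnesSegment checkOnesSegment_alt rstripZeros
  rw [goA_eq, isIn_singleton]
  simp
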